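-- pv_equiv track=rewrite | github.com/kevincaria/estructuraDeDatosConPython | PrimerParcial/Unidad3/ejercicios.py | minimoVector
-- ===== SOURCE A (Python) =====
-- def minimoVector(vector, indice):
--     if indice == 0:
--         return vector[indice]
--     else:
--         valor_actual = vector[indice]
--         valor_minimo_anterior = minimoVector(vector, indice - 1)
--         if valor_actual < valor_minimo_anterior:
--             return valor_actual
--         else:
--             return valor_minimo_anterior
-- ===== SOURCE B (Python) =====
-- def minimoVector(vector, indice):
--     minimo = vector[indice]
--     for i in range(indice):
--         if vector[i] < minimo:
--             minimo = vector[i]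
--     return minimo
-- ===== Notes on version B (the rewrite author's own statement) =====
-- stated objective: simpler
-- what changed: Replaces A's linear recursion (stack-deep, one frame per index) by a plain iterative forward loop that accumulates the minimum, starting from vector[indice].
import Mathlib
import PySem

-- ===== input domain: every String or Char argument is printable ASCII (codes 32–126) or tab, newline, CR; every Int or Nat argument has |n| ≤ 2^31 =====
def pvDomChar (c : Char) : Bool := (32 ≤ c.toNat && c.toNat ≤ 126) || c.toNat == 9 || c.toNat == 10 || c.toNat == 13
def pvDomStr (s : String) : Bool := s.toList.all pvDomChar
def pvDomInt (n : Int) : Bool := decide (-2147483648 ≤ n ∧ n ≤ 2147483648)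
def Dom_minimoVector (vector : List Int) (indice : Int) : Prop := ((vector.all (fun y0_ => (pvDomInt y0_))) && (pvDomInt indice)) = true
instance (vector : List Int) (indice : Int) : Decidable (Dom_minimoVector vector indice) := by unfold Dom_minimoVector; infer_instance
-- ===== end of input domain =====

-- B replaces A's linear recursion by an iterative loop accumulating the minimum (same return value; O(1) space instead of recursion stack).

-- ===== PORT A =====
-- A recurses on indice; on indice ≥ 0 (the only inputs Pre_ admits) the recursion
-- depth is indice, so the port recurses on the Nat indice.toNat, step for step.
def minimoVectorAux (vector : List Int) : Nat → Int
  | 0 => (PySem.List.pyGet? vector 0).getD 0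
  | n+1 =>
    let valor_actual := (PySem.List.pyGet? vector ((n : Int)+1)).getD 0
    let valor_minimo_anterior := minimoVectorAux vector n
    if valor_actual < valor_minimo_anterior then valor_actual else valor_minimo_anterior

def minimoVector (vector : List Int) (indice : Int) : Int :=
  minimoVectorAux vector indice.toNat

-- ===== PORT B =====
def minimoVector_alt (vector : List Int) (indice : Int) : Int :=
  (PySem.List.pyRange 0 indice 1).foldl
    (fun minimo i =>
      if (PySem.List.pyGet? vector i).getD 0 < minimo
      then (PySem.List.pyGet? vector i).getD 0 else minimo)
    ((PySem.List.pyGet? vector indice).getD 0)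

-- ===== PRECONDITION & SPEC =====
-- Pre_: exactly the inputs where Python A returns: 0 ≤ indice < len(vector)
-- (negative indice makes A recurse down until IndexError; indice ≥ len raises IndexError).
def Pre_minimoVector (vector : List Int) (indice : Int) : Prop :=
  0 ≤ indice ∧ indice < vector.length
instance (vector : List Int) (indice : Int) : Decidable (Pre_minimoVector vector indice) := by unfold Pre_minimoVector; infer_instance

def pvWitness_minimoVector : List Int × Int := ([3, 1, 2], 2)

def Spec_minimoVector (vector : List Int) (indice : Int) (out : Int) : Prop := out = minimoVector_alt vector indice
instance (vector : List Int) (indice : Int) (out : Int) : Decidable (Spec_minimoVector vector indice out) := by unfold Spec_minimoVector; infer_instance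

-- ===== CLAIM (what is proved, stated in full; the proofs are below) =====
def Claim_equal_minimoVector : Prop := ∀ (vector : List Int) (indice : Int), Dom_minimoVector vector indice → Pre_minimoVector vector indice → Spec_minimoVector vector indice (minimoVector vector indice)

-- ===== LEMMAS AND PROOFS =====

-- abstract version of B's loop: fold min over the first n indices, with init x
def pvF (vector : List Int) (n : Nat) (x : Int) : Int :=
  (List.range n).foldl (fun m i => min (vector.getD i 0) m) x

lemma pvF_succ (vector : List Int) (n : Nat) (x : Int) :
    pvF vector (n+1) x = min (vector.getD n 0) (pvF vector n x) := by
  simp [pvF, List.range_succ]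

lemma pvF_min_pull (vector : List Int) (n : Nat) (a b : Int) :
    min a (pvF vector n b) = pvF vector n (min a b) := by
  induction n with
  | zero => simp [pvF]
  | succ n ih =>
    rw [pvF_succ, pvF_succ, min_left_comm, ih]

lemma if_lt_eq_min (a b : Int) : (if a < b then a else b) = min a b := by
  rcases lt_or_ge a b with h | h
  · simp [h, min_eq_left h.le]
  · simp [not_lt.mpr h, min_eq_right h]

lemma pyGet_eq_getD (vector : List Int) (n : Nat) (h : n < vector.length) :
    (PySem.List.pyGet? vector (n : Int)).getD 0 = vector.getD n 0 := by
  simp [PySem.List.pyGet?, PySem.List.pyIdx?, h, List.getD]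

lemma aux_eq_pvF (vector : List Int) (n : Nat) (h : n < vector.length) :
    minimoVectorAux vector n = pvF vector n (vector.getD n 0) := by
  induction n with
  | zero =>
    have := pyGet_eq_getD vector 0 h
    simp only [minimoVectorAux, pvF, List.range_zero, List.foldl_nil]
    simpa using this
  | succ n ih =>
    have hn : n < vector.length := Nat.lt_of_succ_lt h
    have hcast : ((n : Int) + 1) = ((n + 1 : Nat) : Int) := by push_cast; ring
    simp only [minimoVectorAux, hcast, pyGet_eq_getD vector (n+1) h, ih hn,
      if_lt_eq_min]
    rw [pvF_min_pull, min_comm, ← pvF_min_pull, ← pvF_succ]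

lemma alt_eq_pvF (vector : List Int) (n : Nat) (h : n < vector.length) :
    minimoVector_alt vector (n : Int) = pvF vector n (vector.getD n 0) := by
  unfold minimoVector_alt pvF
  rw [PySem.List.pyRange_zero_nat, pyGet_eq_getD vector n h]
  rw [List.foldl_map]
  apply PySem.List.foldl_congr_mem
  intro m i hi
  have hi' : i < vector.length := lt_of_lt_of_le (List.mem_range.mp hi) (Nat.le_of_lt h)
  rw [pyGet_eq_getD vector i hi', if_lt_eq_min]

-- ===== VERDICT (by name: the statement is the Claim_ definition above) =====
theorem minimoVector_spec : Claim_equal_minimoVector := by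
  intro vector indice _ hpre
  obtain ⟨h0, hlt⟩ := hpre
  unfold Spec_minimoVector minimoVector
  obtain ⟨n, rfl⟩ := Int.eq_ofNat_of_zero_le h0
  have hn : n < vector.length := by exact_mod_cast hlt
  have : ((n : Int)).toNat = n := Int.toNat_natCast n
  rw [this, aux_eq_pvF vector n hn, alt_eq_pvF vector n hn]
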